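-- pv_equiv track=rewrite | github.com/eeryczeek/advent_of_code | 2023/day5/main.py | get_conversions
-- ===== SOURCE A (Python) =====
-- def get_conversions(lines):
--     conversions = {}
--     for i, line in enumerate(lines[1:]):
--         if line.endswith('map:\n'):
--             converter_name = line.split()[0]
--             conversions[converter_name] = []
--             for j, line in enumerate(lines[i + 2:]):
--                 if line == '\n':
--                     break
--                 conversions[converter_name].append(((int(line.split()[1]), int(line.split()[1]) + int(
--                     line.split()[2])), (int(line.split()[0]), int(line.split()[0]) + int(line.split()[2]))))
--             for key, value in conversions.items():
--                 value.sort()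
--                 conversions[key] = value
--     return conversions
-- ===== SOURCE B (Python) =====
-- def get_conversions(lines):
--     conversions = {}
--     current = None
--     for line in lines[1:]:
--         if line.endswith('map:\n'):
--             current = line.split()[0]
--             conversions[current] = []
--         elif line == '\n':
--             current = None
--         elif current is not None:
--             s = line.split()
--             dst, src, length = int(s[0]), int(s[1]), int(s[2])
--             conversions[current].append(((src, src + length), (dst, dst + length)))
--     return {k: sorted(v) for k, v in conversions.items()}
-- ===== Notes on version B (the rewrite author's own statement) =====
-- stated objective: simpler
-- what changed: A's nested loops (re-scanning the block after each header and re-sorting every stored list per header) are replaced by one linear pass with a current-block state variable and a single final sort per list.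
import Mathlib
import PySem

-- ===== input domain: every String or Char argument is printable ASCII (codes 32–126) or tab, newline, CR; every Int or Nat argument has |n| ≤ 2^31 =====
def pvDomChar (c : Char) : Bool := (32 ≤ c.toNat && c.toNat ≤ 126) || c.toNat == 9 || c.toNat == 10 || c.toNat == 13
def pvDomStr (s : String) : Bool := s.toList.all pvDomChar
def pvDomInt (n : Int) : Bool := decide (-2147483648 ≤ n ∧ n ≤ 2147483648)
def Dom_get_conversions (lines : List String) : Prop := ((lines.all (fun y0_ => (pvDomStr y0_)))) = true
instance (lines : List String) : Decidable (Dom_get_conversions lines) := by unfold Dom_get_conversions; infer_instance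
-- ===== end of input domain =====

-- B replaces A's nested header/inner-block loops and per-header re-sort of every list by one
-- linear pass with a current-block state variable and a single final sort per list (objective: simpler).

-- Python's tuple comparison on ((int,int),(int,int)) is the lexicographic order: the key maps into
-- Mathlib's Lex product order, whose `<` is exactly Python's `<` on these nested pairs.
def pvKey (e : (Int × Int) × (Int × Int)) : Lex (Lex (Int × Int) × Lex (Int × Int)) :=
  toLex (toLex e.1, toLex e.2)

-- `sorted(v)` / `v.sort()` on a list of such tuples (used by both Pythons).
def pvSortE (v : List ((Int × Int) × (Int × Int))) : List ((Int × Int) × (Int × Int)) :=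
  PySem.List.sorted v pvKey

-- ===== PORT A =====

-- int(line.split()[i]); `.getD 0` stands where Python raises IndexError/ValueError — outside Pre_.
def pvAInt (line : String) (i : Int) : Int :=
  ((PySem.List.pyGet? (PySem.Str.split₀ line) i).bind PySem.Int.ofStr?).getD 0

-- ((int(s[1]), int(s[1])+int(s[2])), (int(s[0]), int(s[0])+int(s[2])))
def pvAEntry (line : String) : (Int × Int) × (Int × Int) :=
  ((pvAInt line 1, pvAInt line 1 + pvAInt line 2), (pvAInt line 0, pvAInt line 0 + pvAInt line 2))

-- line.split()[0]  (a header line always has a first token; `.getD ""` is unreachable there)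
def pvAName (line : String) : String :=
  (PySem.List.pyGet? (PySem.Str.split₀ line) 0).getD ""

-- inner loop: for line in lines[i+2:]: if line == '\n': break; conversions[name].append(entry)
def pvAInner (name : String) (rest : List String)
    (d : PySem.Dict String (List ((Int × Int) × (Int × Int)))) :
    PySem.Dict String (List ((Int × Int) × (Int × Int))) :=
  match rest with
  | [] => d
  | line :: r =>
    if line == "\n" then d
    else pvAInner name r (d.modify name [] (fun v => v ++ [pvAEntry line]))

-- for key, value in conversions.items(): value.sort(); conversions[key] = value
def pvASortAll (d : PySem.Dict String (List ((Int × Int) × (Int × Int)))) :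
    PySem.Dict String (List ((Int × Int) × (Int × Int))) :=
  d.items.foldl (fun acc kv => acc.insert kv.1 (pvSortE kv.2)) d

-- outer loop over lines[1:]; the inner loop reads lines[i+2:], which is exactly `rest`
def pvAOuter (l : List String) (d : PySem.Dict String (List ((Int × Int) × (Int × Int)))) :
    PySem.Dict String (List ((Int × Int) × (Int × Int))) :=
  match l with
  | [] => d
  | line :: rest =>
    if PySem.Str.endswith line "map:\n" then
      pvAOuter rest (pvASortAll (pvAInner (pvAName line) rest (d.insert (pvAName line) [])))
    else pvAOuter rest d

def get_conversions (lines : List String) : List (String × List ((Int × Int) × (Int × Int))) :=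
  (pvAOuter (PySem.List.slice lines (some 1) none) PySem.Dict.empty).items

-- ===== PORT B =====

-- line.split()[0] on a header line
def pvBName (line : String) : String :=
  (PySem.List.pyGet? (PySem.Str.split₀ line) 0).getD ""

-- s = line.split(); dst, src, length = int(s[0]), int(s[1]), int(s[2]); the appended pair
def pvBEntry (line : String) : (Int × Int) × (Int × Int) :=
  let s := PySem.Str.split₀ line
  let dst := ((PySem.List.pyGet? s 0).bind PySem.Int.ofStr?).getD 0
  let src := ((PySem.List.pyGet? s 1).bind PySem.Int.ofStr?).getD 0
  let length := ((PySem.List.pyGet? s 2).bind PySem.Int.ofStr?).getD 0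
  ((src, src + length), (dst, dst + length))

-- the single pass: `cur` is B's `current` (None ↔ no open block)
def pvBGo (l : List String) (d : PySem.Dict String (List ((Int × Int) × (Int × Int))))
    (cur : Option String) : PySem.Dict String (List ((Int × Int) × (Int × Int))) :=
  match l with
  | [] => d
  | line :: rest =>
    if PySem.Str.endswith line "map:\n" then
      pvBGo rest (d.insert (pvBName line) []) (some (pvBName line))
    else if line == "\n" then pvBGo rest d none
    else
      match cur with
      | some n => pvBGo rest (d.modify n [] (fun v => v ++ [pvBEntry line])) (some n)
      | none => pvBGo rest d none

-- {k: sorted(v) for k, v in conversions.items()}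
def get_conversions_alt (lines : List String) : List (String × List ((Int × Int) × (Int × Int))) :=
  (pvBGo (PySem.List.slice lines (some 1) none) PySem.Dict.empty none).items.map
    (fun kv => (kv.1, pvSortE kv.2))

-- ===== PRECONDITION & SPEC =====

-- a usable data line: not itself a header, and tokens 0,1,2 exist and parse as ints
def pvGoodLine (line : String) : Bool :=
  !(PySem.Str.endswith line "map:\n") &&
  ((PySem.List.pyGet? (PySem.Str.split₀ line) 0).bind PySem.Int.ofStr?).isSome &&
  ((PySem.List.pyGet? (PySem.Str.split₀ line) 1).bind PySem.Int.ofStr?).isSome &&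
  ((PySem.List.pyGet? (PySem.Str.split₀ line) 2).bind PySem.Int.ofStr?).isSome

-- the lines after a header, up to the first '\n' (or the end), are all good data lines
def pvBlockOk : List String → Bool
  | [] => true
  | line :: rest => line == "\n" || (pvGoodLine line && pvBlockOk rest)

-- the input grammar: every header line at position ≥ 1 is followed by a well-formed block
def pvTailOk : List String → Bool
  | [] => true
  | line :: rest => (!(PySem.Str.endswith line "map:\n") || pvBlockOk rest) && pvTailOk rest

-- Pre_ excludes the inputs where a block line fails to parse as three ints (A raises
-- ValueError/IndexError there) and the defensible corner where a block line is simultaneously a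
-- valid data line and a 'map:'-header (e.g. '1 2 3 map:\n'): A accidentally treats such a line
-- both as data of the open block and as a new header, B treats it as a header only.
def Pre_get_conversions (lines : List String) : Prop :=
  pvTailOk (lines.drop 1) = true

instance (lines : List String) : Decidable (Pre_get_conversions lines) := by
  unfold Pre_get_conversions; infer_instance

def pvWitness_get_conversions : List String :=
  ["seeds: 79 14\n", "seed-to-soil map:\n", "50 98 2\n", "52 50 48\n", "\n", "soil-to-fert map:\n"]

def Spec_get_conversions (lines : List String) (out : List (String × List ((Int × Int) × (Int × Int)))) : Prop := out = get_conversions_alt lines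
instance (lines : List String) (out : List (String × List ((Int × Int) × (Int × Int)))) : Decidable (Spec_get_conversions lines out) := by unfold Spec_get_conversions; infer_instance

-- ===== CLAIM (what is proved, stated in full; the proofs are below) =====
def Claim_equal_get_conversions : Prop := ∀ (lines : List String), Dom_get_conversions lines → Pre_get_conversions lines → Spec_get_conversions lines (get_conversions lines)

-- ===== LEMMAS AND PROOFS =====

-- sort every value of a dict (the meaning of B's final comprehension)
def pvMS (d : PySem.Dict String (List ((Int × Int) × (Int × Int)))) :
    PySem.Dict String (List ((Int × Int) × (Int × Int))) :=
  ⟨d.items.map (fun kv => (kv.1, pvSortE kv.2))⟩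

-- the entries of one block (up to the first '\n')
def pvBlk : List String → List ((Int × Int) × (Int × Int))
  | [] => []
  | line :: r => if line == "\n" then [] else pvAEntry line :: pvBlk r

theorem pvEntry_eq (line : String) : pvBEntry line = pvAEntry line := rfl

theorem pvSortE_sortE (v : List ((Int × Int) × (Int × Int))) :
    pvSortE (pvSortE v) = pvSortE v := PySem.List.sorted_sorted v pvKey

theorem pvGoodLine_ne_newline {line : String} (h : pvGoodLine line = true) : (line == "\n") = false := by
  rcases instDecidableEqBool (line == "\n") true with hf | ht
  · simpa using hf
  · exfalso
    have : line = "\n" := by simpa using ht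
    subst this
    revert h; decide

theorem pvInsert_getD_self (d : PySem.Dict String (List ((Int × Int) × (Int × Int))))
    (k : String) (hc : d.contains k = true) (hn : d.keys.Nodup) :
    d.insert k (d.getD k []) = d := by
  apply PySem.Dict.ext
  rw [PySem.Dict.items_insert_of_contains d _ hc]
  conv_rhs => rw [← List.map_id d.items]
  apply List.map_congr_left
  intro p hp
  by_cases hpk : (p.1 == k) = true
  · have hk : p.1 = k := by simpa using hpk
    have : d.getD p.1 [] = p.2 := PySem.Dict.getD_of_mem_items d (by exact hp) hn []
    simp [← hk, this]
  · simp [hpk]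

theorem pvKeys_insert_nodup {d : PySem.Dict String (List ((Int × Int) × (Int × Int)))}
    (h : d.keys.Nodup) (k : String) (v : List ((Int × Int) × (Int × Int))) :
    (d.insert k v).keys.Nodup := by
  by_cases hc : d.contains k = true
  · rw [PySem.Dict.keys_insert_of_contains d v hc]; exact h
  · rw [PySem.Dict.keys_insert_of_not_contains d v (by simpa using hc)]
    have hk : k ∉ d.keys := by
      intro hk
      exact hc ((PySem.Dict.contains_iff_mem_keys d k).mpr hk)
    rw [List.nodup_append]
    refine ⟨h, List.nodup_singleton k, fun a ha b hb => ?_⟩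
    have : b = k := by simpa using hb
    subst this
    exact fun heq => hk (heq ▸ ha)

theorem pvAInner_eq (name : String) (rest : List String)
    (d : PySem.Dict String (List ((Int × Int) × (Int × Int))))
    (hc : d.contains name = true) (hn : d.keys.Nodup) :
    pvAInner name rest d = d.insert name (d.getD name [] ++ pvBlk rest) := by
  induction rest generalizing d with
  | nil =>
    show d = d.insert name (d.getD name [] ++ [])
    rw [List.append_nil, pvInsert_getD_self d name hc hn]
  | cons line r ih =>
    by_cases h : (line == "\n") = true
    · show (if (line == "\n") = true then d else _) = _
      rw [if_pos h]
      show d = d.insert name (d.getD name [] ++ pvBlk (line :: r))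
      rw [show pvBlk (line :: r) = [] by simp [pvBlk, h], List.append_nil,
        pvInsert_getD_self d name hc hn]
    · show (if (line == "\n") = true then d else pvAInner name r (d.modify name [] _)) = _
      rw [if_neg h]
      rw [ih (d.modify name [] (fun v => v ++ [pvAEntry line]))
        (by simp [PySem.Dict.modify])
        (by simp only [PySem.Dict.modify]; exact pvKeys_insert_nodup hn _ _)]
      simp only [PySem.Dict.modify, PySem.Dict.getD_insert_self, PySem.Dict.insert_insert_self]
      rw [List.append_assoc]
      congr 1
      simp [pvBlk, h]

-- keys are preserved (as a list) by pvMS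
theorem pvMS_keys (d : PySem.Dict String (List ((Int × Int) × (Int × Int)))) :
    (pvMS d).keys = d.keys := by
  simp [pvMS, PySem.Dict.keys]

theorem pvMS_contains (d : PySem.Dict String (List ((Int × Int) × (Int × Int)))) (k : String) :
    (pvMS d).contains k = d.contains k := by
  simp only [pvMS, PySem.Dict.contains, List.any_map]
  rfl

theorem pvMS_insert (d : PySem.Dict String (List ((Int × Int) × (Int × Int)))) (k : String)
    (v : List ((Int × Int) × (Int × Int))) :
    pvMS (d.insert k v) = (pvMS d).insert k (pvSortE v) := by
  apply PySem.Dict.ext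
  by_cases hc : d.contains k = true
  · rw [show (pvMS (d.insert k v)).items
        = ((d.insert k v).items).map (fun kv => (kv.1, pvSortE kv.2)) from rfl,
      PySem.Dict.items_insert_of_contains d v hc,
      PySem.Dict.items_insert_of_contains (pvMS d) (pvSortE v) (by rw [pvMS_contains]; exact hc)]
    show _ = ((d.items.map (fun kv => (kv.1, pvSortE kv.2))).map _)
    rw [List.map_map, List.map_map]
    apply List.map_congr_left
    intro p _
    by_cases hpk : (p.1 == k) = true
    · simp [Function.comp, hpk]
    · simp [Function.comp, hpk]
  · have hc' : d.contains k = false := by simpa using hc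
    rw [show (pvMS (d.insert k v)).items
        = ((d.insert k v).items).map (fun kv => (kv.1, pvSortE kv.2)) from rfl,
      PySem.Dict.items_insert_of_not_contains d v hc',
      PySem.Dict.items_insert_of_not_contains (pvMS d) (pvSortE v) (by rw [pvMS_contains]; exact hc')]
    simp [pvMS]

theorem pvMS_pvMS (d : PySem.Dict String (List ((Int × Int) × (Int × Int)))) :
    pvMS (pvMS d) = pvMS d := by
  apply PySem.Dict.ext
  simp [pvMS, pvSortE_sortE]

theorem pvSortFold (post pre : List (String × List ((Int × Int) × (Int × Int))))
    (acc : PySem.Dict String (List ((Int × Int) × (Int × Int))))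
    (hacc : acc.items = pre.map (fun kv => (kv.1, pvSortE kv.2)) ++ post)
    (hnd : ((pre ++ post).map (fun kv => kv.1)).Nodup) :
    (post.foldl (fun a kv => a.insert kv.1 (pvSortE kv.2)) acc).items
      = (pre ++ post).map (fun kv => (kv.1, pvSortE kv.2)) := by
  induction post generalizing pre acc with
  | nil => simpa using hacc
  | cons kv post' ih =>
    have hkeys : acc.keys = pre.map (fun kv => kv.1) ++ kv.1 :: post'.map (fun kv => kv.1) := by
      simp [PySem.Dict.keys, hacc]
    have hc : acc.contains kv.1 = true := by
      rw [PySem.Dict.contains_iff_mem_keys, hkeys]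
      simp
    have hnd' := hnd
    rw [List.map_append, List.map_cons, List.nodup_append] at hnd'
    have hnotpre : ∀ p ∈ pre, (p.1 == kv.1) = false := by
      intro p hp
      have hmem : p.1 ∈ pre.map (fun kv => kv.1) := List.mem_map_of_mem hp
      by_contra hbad
      have hpeq : p.1 = kv.1 := by simpa using (Bool.not_eq_false _).mp hbad
      exact hnd'.2.2 p.1 hmem kv.1 (by simp) hpeq
    have hnotpost : ∀ p ∈ post', (p.1 == kv.1) = false := by
      intro p hp
      have h2 := hnd'.2.1
      rw [List.nodup_cons] at h2
      by_contra hbad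
      have hpeq : p.1 = kv.1 := by simpa using (Bool.not_eq_false _).mp hbad
      exact h2.1 (by rw [← hpeq]; exact List.mem_map_of_mem hp)
    show ((post'.foldl (fun a kv => a.insert kv.1 (pvSortE kv.2)) (acc.insert kv.1 (pvSortE kv.2)))).items = _
    have hstep : (acc.insert kv.1 (pvSortE kv.2)).items
        = (pre ++ [kv]).map (fun kv => (kv.1, pvSortE kv.2)) ++ post' := by
      rw [PySem.Dict.items_insert_of_contains acc (pvSortE kv.2) hc, hacc, List.map_append]
      have h1 : (pre.map (fun kv => (kv.1, pvSortE kv.2))).map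
          (fun p => if (p.1 == kv.1) = true then (kv.1, pvSortE kv.2) else p)
          = pre.map (fun kv => (kv.1, pvSortE kv.2)) := by
        rw [List.map_map]
        apply List.map_congr_left
        intro p hp
        have hne : (p.1 == kv.1) = false := hnotpre p hp
        simp only [Function.comp_def]
        rw [if_neg (by simp [hne])]
      have h2 : (kv :: post').map
          (fun p => if (p.1 == kv.1) = true then (kv.1, pvSortE kv.2) else p)
          = (kv.1, pvSortE kv.2) :: post' := by
        rw [List.map_cons]
        congr 1
        · simp
        · conv_rhs => rw [← List.map_id post']
          apply List.map_congr_left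
          intro p hp
          simp [hnotpost p hp]
      rw [h1, h2]
      simp
    rw [ih (pre ++ [kv]) _ hstep (by simpa using hnd)]
    simp

theorem pvASortAll_eq {d : PySem.Dict String (List ((Int × Int) × (Int × Int)))}
    (h : d.keys.Nodup) : pvASortAll d = pvMS d := by
  apply PySem.Dict.ext
  have := pvSortFold d.items [] d (by simp) (by simpa [PySem.Dict.keys] using h)
  simpa [pvASortAll, pvMS] using this

-- the mutual loop invariant: with no open block the two passes agree; with block `n` open,
-- B still has to append exactly the entries A already appended at the header.
theorem pvMain (l : List String) :
    (∀ d, d.keys.Nodup → pvTailOk l = true →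
      pvMS (pvBGo l d none) = pvAOuter l (pvMS d)) ∧
    (∀ d n, d.keys.Nodup → d.contains n = true → pvBlockOk l = true → pvTailOk l = true →
      pvMS (pvBGo l d (some n)) = pvAOuter l (pvMS (pvAInner n l d))) := by
  induction l with
  | nil =>
    constructor
    · intro d _ _; rfl
    · intro d n _ _ _ _; rfl
  | cons line rest ih =>
    have hname : pvBName line = pvAName line := rfl
    constructor
    · -- no open block
      intro d hnd htail
      have htail' : pvTailOk rest = true := by
        simp only [pvTailOk, Bool.and_eq_true] at htail; exact htail.2
      by_cases hh : PySem.Str.endswith line "map:\n" = true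
      · -- a header line: A fills the whole block here, B opens it
        have hblock : pvBlockOk rest = true := by
          simp only [pvTailOk, Bool.and_eq_true, Bool.or_eq_true, Bool.not_eq_true'] at htail
          rcases htail.1 with h' | h'
          · rw [hh] at h'; cases h'
          · exact h'
        rw [show pvBGo (line :: rest) d none
            = pvBGo rest (d.insert (pvBName line) []) (some (pvBName line)) by
          conv_lhs => rw [pvBGo]
          rw [if_pos hh]]
        rw [show pvAOuter (line :: rest) (pvMS d)
            = pvAOuter rest (pvASortAll
                (pvAInner (pvAName line) rest ((pvMS d).insert (pvAName line) []))) by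
          conv_lhs => rw [pvAOuter]
          rw [if_pos hh]]
        have hmsnd : (pvMS d).keys.Nodup := by rw [pvMS_keys]; exact hnd
        rw [pvAInner_eq _ _ _ (by simp)
            (pvKeys_insert_nodup hmsnd _ _),
          PySem.Dict.getD_insert_self, PySem.Dict.insert_insert_self, List.nil_append]
        rw [pvASortAll_eq (pvKeys_insert_nodup hmsnd _ _)]
        rw [pvMS_insert, pvMS_pvMS]
        rw [ih.2 (d.insert (pvBName line) []) (pvBName line) (pvKeys_insert_nodup hnd _ _)
          (by simp) hblock htail']
        rw [pvAInner_eq _ _ _ (by simp)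
            (pvKeys_insert_nodup hnd _ _),
          PySem.Dict.getD_insert_self, PySem.Dict.insert_insert_self, List.nil_append]
        rw [hname, pvMS_insert]
      · -- not a header: both passes skip ('\n' or not)
        rw [show pvAOuter (line :: rest) (pvMS d) = pvAOuter rest (pvMS d) by
          conv_lhs => rw [pvAOuter]
          rw [if_neg hh]]
        by_cases hn : (line == "\n") = true
        · rw [show pvBGo (line :: rest) d none = pvBGo rest d none by
            conv_lhs => rw [pvBGo]
            rw [if_neg hh, if_pos hn]]
          exact ih.1 d hnd htail'
        · rw [show pvBGo (line :: rest) d none = pvBGo rest d none by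
            conv_lhs => rw [pvBGo]
            rw [if_neg hh, if_neg hn]]
          exact ih.1 d hnd htail'
    · -- block `n` is open
      intro d n hnd hcn hblock htail
      have htail' : pvTailOk rest = true := by
        simp only [pvTailOk, Bool.and_eq_true] at htail; exact htail.2
      simp only [pvBlockOk, Bool.or_eq_true, Bool.and_eq_true] at hblock
      rcases hblock with hn | ⟨hgood, hblock'⟩
      · -- line == '\n': the block closes on both sides
        have hline : line = "\n" := by simpa using hn
        subst hline
        have hh : PySem.Str.endswith "\n" "map:\n" = false := by decide
        rw [show pvBGo ("\n" :: rest) d (some n) = pvBGo rest d none by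
          conv_lhs => rw [pvBGo]
          rw [if_neg (by rw [hh]; exact Bool.false_ne_true), if_pos (by simp)]]
        rw [show pvAInner n ("\n" :: rest) d = d by
          conv_lhs => rw [pvAInner]
          rw [if_pos (by simp)]]
        rw [show pvAOuter ("\n" :: rest) (pvMS d) = pvAOuter rest (pvMS d) by
          conv_lhs => rw [pvAOuter]
          rw [if_neg (by rw [hh]; exact Bool.false_ne_true)]]
        exact ih.1 d hnd htail'
      · -- a good data line: B appends now what A already appended at the header
        have hh : PySem.Str.endswith line "map:\n" = false := by
          simp only [pvGoodLine, Bool.and_eq_true, Bool.not_eq_true'] at hgood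
          exact hgood.1.1.1
        have hn : (line == "\n") = false := pvGoodLine_ne_newline hgood
        rw [show pvBGo (line :: rest) d (some n)
            = pvBGo rest (d.modify n [] (fun v => v ++ [pvBEntry line])) (some n) by
          conv_lhs => rw [pvBGo]
          rw [if_neg (by rw [hh]; exact Bool.false_ne_true), if_neg (by rw [hn]; exact Bool.false_ne_true)]]
        rw [show pvAInner n (line :: rest) d
            = pvAInner n rest (d.modify n [] (fun v => v ++ [pvAEntry line])) by
          conv_lhs => rw [pvAInner]
          rw [if_neg (by rw [hn]; exact Bool.false_ne_true)]]
        rw [show pvAOuter (line :: rest)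
              (pvMS (pvAInner n rest (d.modify n [] (fun v => v ++ [pvAEntry line]))))
            = pvAOuter rest
              (pvMS (pvAInner n rest (d.modify n [] (fun v => v ++ [pvAEntry line])))) by
          conv_lhs => rw [pvAOuter]
          rw [if_neg (by rw [hh]; exact Bool.false_ne_true)]]
        rw [pvEntry_eq]
        exact ih.2 (d.modify n [] (fun v => v ++ [pvAEntry line])) n
          (by simp only [PySem.Dict.modify]; exact pvKeys_insert_nodup hnd _ _)
          (by simp [PySem.Dict.modify])
          hblock' htail'

-- ===== VERDICT (by name: the statement is the Claim_ definition above) =====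
theorem get_conversions_spec : Claim_equal_get_conversions := by
  intro lines _ hpre
  unfold Spec_get_conversions get_conversions get_conversions_alt
  rw [PySem.List.slice_from lines (by norm_num)]
  have h := (pvMain ((lines.drop (1 : Int).toNat))).1 PySem.Dict.empty (by simp [PySem.Dict.keys, PySem.Dict.empty]) (by simpa [Pre_get_conversions] using hpre)
  have : pvMS PySem.Dict.empty = PySem.Dict.empty := rfl
  rw [this] at h
  rw [← h]
  rfl
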